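-- pv_equiv track=rewrite | github.com/tycyd/codeforces | tree/BIT/1442B Identify the Operations.py | right_bs
-- ===== SOURCE A (Python) =====
-- def right_bs(l, h, cv, bit_a):
--     if l > h or cv == bit_query(bit_a, h):
--         return -1
--
--     while l < h:
--         m = (l + h) // 2
--         if bit_query(bit_a, m) != cv:
--             h = m
--         else:
--             l = m + 1
--     return h
--
-- def bit_query(bit_a, i):
--     i += 1
--     r = 0
--     while i > 0:
--         r += bit_a[i]
--         i -= (i & -i)
--     return r
-- ===== SOURCE B (Python) =====
-- def right_bs(l, h, cv, bit_a):
--     pre = _prefix_table(bit_a)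
--     if l > h or cv == _q(pre, h):
--         return -1
--     return _descend(l, h, cv, pre)
--
-- def _prefix_table(bit_a):
--     # pre[j] = bit_query(bit_a, j-1): whole prefix-sum table in one forward pass
--     pre = [0] * len(bit_a)
--     for j in range(1, len(bit_a)):
--         pre[j] = bit_a[j] + pre[j - (j & -j)]
--     return pre
--
-- def _q(pre, i):
--     return pre[i + 1] if i + 1 > 0 else 0
--
-- def _descend(l, h, cv, pre):
--     if l >= h:
--         return h
--     m = (l + h) // 2
--     if _q(pre, m) != cv:
--         return _descend(l, m, cv, pre)
--     return _descend(m + 1, h, cv, pre)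
-- ===== Notes on version B (the rewrite author's own statement) =====
-- stated objective: alternative
-- what changed: B builds the entire prefix-sum table from the Fenwick array in one forward pass and then runs a recursive binary search over O(1) table lookups, instead of A's iterative binary search that re-walks a Fenwick chain for every probe.
import Mathlib
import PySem

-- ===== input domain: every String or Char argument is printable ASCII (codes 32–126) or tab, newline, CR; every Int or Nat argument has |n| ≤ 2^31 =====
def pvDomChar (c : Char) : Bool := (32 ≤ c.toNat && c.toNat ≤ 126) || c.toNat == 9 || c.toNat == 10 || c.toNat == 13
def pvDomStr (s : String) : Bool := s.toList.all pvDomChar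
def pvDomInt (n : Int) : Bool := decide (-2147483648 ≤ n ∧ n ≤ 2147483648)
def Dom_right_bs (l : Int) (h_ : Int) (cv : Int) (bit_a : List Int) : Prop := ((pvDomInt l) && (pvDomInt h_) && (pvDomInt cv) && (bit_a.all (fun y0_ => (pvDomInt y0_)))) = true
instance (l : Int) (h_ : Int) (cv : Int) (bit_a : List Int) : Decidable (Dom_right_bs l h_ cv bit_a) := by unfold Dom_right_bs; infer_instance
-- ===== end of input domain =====

-- B replaces A's per-probe Fenwick chain walk by a one-pass precomputed prefix-sum table
-- plus a recursive binary search (alternative decomposition, not claimed faster).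


-- lowbit bound, needed for termination of both ports' chain recursions
theorem pvLowbitBounds (i : Int) (h : 0 < i) :
    1 ≤ PySem.Int.band i (-i) ∧ PySem.Int.band i (-i) ≤ i := by
  have h0 : 0 ≤ i := le_of_lt h
  have hnb : ¬ (0 ≤ -i) := by omega
  have hb : PySem.Int.band i (-i) = ((i.toNat - (i.toNat &&& (i - 1).toNat) : Nat) : Int) := by
    simp only [PySem.Int.band, if_pos h0, if_neg hnb, neg_neg]
  have hand : i.toNat &&& (i - 1).toNat ≤ (i - 1).toNat := Nat.and_le_right
  omega

-- midpoint is strictly below the upper end, needed for termination of the searches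
theorem pvMidLt (l h_ : Int) (h : l < h_) : PySem.Int.floordiv (l + h_) 2 < h_ := by
  rw [PySem.Int.floordiv_lt_iff_lt_mul (by omega)]
  omega

-- ===== PORT A =====
-- bit_query's while loop: r += bit_a[i]; i -= i & -i
def bitQueryGo (bit_a : List Int) (i : Int) (r : Int) : Int :=
  if h : 0 < i then
    bitQueryGo bit_a (i - PySem.Int.band i (-i)) (r + PySem.List.pyGetD bit_a i 0)
  else r
termination_by i.toNat
decreasing_by
  have := pvLowbitBounds i h
  omega

def bitQuery (bit_a : List Int) (i : Int) : Int :=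
  bitQueryGo bit_a (i + 1) 0

-- the 'while l < h' binary-search loop of A
def rbLoop (l : Int) (h_ : Int) (cv : Int) (bit_a : List Int) : Int :=
  if hlt : l < h_ then
    let m := PySem.Int.floordiv (l + h_) 2
    if bitQuery bit_a m ≠ cv then rbLoop l m cv bit_a
    else rbLoop (m + 1) h_ cv bit_a
  else h_
termination_by (h_ - l).toNat
decreasing_by
  · have h1 := PySem.Int.floordiv_two_mid_bounds (le_of_lt hlt) (lo := l) (hi := h_)
    have h2 := pvMidLt l h_ hlt
    omega
  · have h1 := PySem.Int.floordiv_two_mid_bounds (le_of_lt hlt) (lo := l) (hi := h_)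
    omega

def right_bs (l : Int) (h_ : Int) (cv : Int) (bit_a : List Int) : Int :=
  if l > h_ ∨ cv = bitQuery bit_a h_ then -1
  else rbLoop l h_ cv bit_a

-- ===== PORT B =====
-- pre = [0]*len; for j in range(1, len): pre[j] = bit_a[j] + pre[j - (j & -j)]
def preTable (bit_a : List Int) : List Int :=
  (PySem.List.pyRange 1 (bit_a.length : Int) 1).foldl
    (fun pre j =>
      PySem.List.pySetD pre j
        (PySem.List.pyGetD bit_a j 0 + PySem.List.pyGetD pre (j - PySem.Int.band j (-j)) 0))
    (List.replicate bit_a.length 0)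

-- _q(pre, i)
def qAlt (pre : List Int) (i : Int) : Int :=
  if 0 < i + 1 then PySem.List.pyGetD pre (i + 1) 0 else 0

-- _descend
def rbDescend (l : Int) (h_ : Int) (cv : Int) (pre : List Int) : Int :=
  if hlt : l < h_ then
    let m := PySem.Int.floordiv (l + h_) 2
    if qAlt pre m ≠ cv then rbDescend l m cv pre
    else rbDescend (m + 1) h_ cv pre
  else h_
termination_by (h_ - l).toNat
decreasing_by
  · have h1 := PySem.Int.floordiv_two_mid_bounds (le_of_lt hlt) (lo := l) (hi := h_)
    have h2 := pvMidLt l h_ hlt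
    omega
  · have h1 := PySem.Int.floordiv_two_mid_bounds (le_of_lt hlt) (lo := l) (hi := h_)
    omega

def right_bs_alt (l : Int) (h_ : Int) (cv : Int) (bit_a : List Int) : Int :=
  let pre := preTable bit_a
  if l > h_ ∨ cv = qAlt pre h_ then -1
  else rbDescend l h_ cv pre

-- ===== PRECONDITION & SPEC =====
-- Pre_ holds exactly where A returns: otherwise A's bit_query indexes bit_a out of range
-- (the query index h+1, or a chain index below it, reaches len(bit_a) or beyond) and A
-- raises IndexError.
def Pre_right_bs (l : Int) (h_ : Int) (cv : Int) (bit_a : List Int) : Prop :=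
  h_ < l ∨ h_ < 0 ∨ h_ + 1 < (bit_a.length : Int)
instance (l : Int) (h_ : Int) (cv : Int) (bit_a : List Int) : Decidable (Pre_right_bs l h_ cv bit_a) := by unfold Pre_right_bs; infer_instance

def pvWitness_right_bs : Int × Int × Int × List Int := (0, 1, 5, [0, 3, 4])

def Spec_right_bs (l : Int) (h_ : Int) (cv : Int) (bit_a : List Int) (out : Int) : Prop := out = right_bs_alt l h_ cv bit_a
instance (l : Int) (h_ : Int) (cv : Int) (bit_a : List Int) (out : Int) : Decidable (Spec_right_bs l h_ cv bit_a out) := by unfold Spec_right_bs; infer_instance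

-- ===== CLAIM (what is proved, stated in full; the proofs are below) =====
def Claim_equal_right_bs : Prop := ∀ (l : Int) (h_ : Int) (cv : Int) (bit_a : List Int), Dom_right_bs l h_ cv bit_a → Pre_right_bs l h_ cv bit_a → Spec_right_bs l h_ cv bit_a (right_bs l h_ cv bit_a)

-- ===== LEMMAS AND PROOFS =====

-- accumulator of the chain walk splits off
theorem bitQueryGo_acc (bit_a : List Int) (i r : Int) :
    bitQueryGo bit_a i r = r + bitQueryGo bit_a i 0 := by
  induction hn : i.toNat using Nat.strong_induction_on generalizing i r with
  | _ n ih =>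
    rw [bitQueryGo]
    conv_rhs => rw [bitQueryGo]
    by_cases h : 0 < i
    · have hb := pvLowbitBounds i h
      simp only [dif_pos h]
      rw [ih (i - PySem.Int.band i (-i)).toNat (by omega) _ _ rfl,
          ih (i - PySem.Int.band i (-i)).toNat (by omega)
            (i - PySem.Int.band i (-i)) (0 + PySem.List.pyGetD bit_a i 0) rfl]
      ring
    · simp only [dif_neg h]
      omega

-- one unfolding step of the chain walk at a positive index
theorem bitQueryGo_pos (bit_a : List Int) (j : Int) (h : 0 < j) :
    bitQueryGo bit_a j 0 =
      PySem.List.pyGetD bit_a j 0 + bitQueryGo bit_a (j - PySem.Int.band j (-j)) 0 := by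
  conv_lhs => rw [bitQueryGo]
  rw [dif_pos h, bitQueryGo_acc]
  ring

-- the table built by B holds exactly the chain sums A computes
-- the fold preserves list length
theorem foldl_set_length (bit_a : List Int) (js : List Int) (pre : List Int) :
    (js.foldl
      (fun pre j =>
        PySem.List.pySetD pre j
          (PySem.List.pyGetD bit_a j 0 + PySem.List.pyGetD pre (j - PySem.Int.band j (-j)) 0))
      pre).length = pre.length := by
  induction js generalizing pre with
  | nil => rfl
  | cons j js ih => simp [ih, PySem.List.length_pySetD]

-- invariant: after processing range(1, k) the first k table entries are the chain sums
theorem preTable_inv (bit_a : List Int) (k : Nat) (hk : (k : Int) ≤ (bit_a.length : Int)) :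
    ∀ j : Int, 0 ≤ j → j < (k : Int) →
      PySem.List.pyGetD
        ((PySem.List.pyRange 1 (k : Int) 1).foldl
          (fun pre j =>
            PySem.List.pySetD pre j
              (PySem.List.pyGetD bit_a j 0 + PySem.List.pyGetD pre (j - PySem.Int.band j (-j)) 0))
          (List.replicate bit_a.length 0)) j 0 = bitQueryGo bit_a j 0 := by
  induction k with
  | zero => intro j h0 hj; omega
  | succ k ih =>
    intro j h0 hj
    have hcast : (((k + 1 : Nat)) : Int) = ((k : Nat) : Int) + 1 := by push_cast; ring
    rw [hcast] at hj hk ⊢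
    by_cases hk0 : k = 0
    · subst hk0
      have hj0 : j = 0 := by omega
      subst hj0
      rw [PySem.List.pyRange_one_eq_nil (by norm_num)]
      simp only [List.foldl_nil]
      rw [bitQueryGo, dif_neg (by omega)]
      rw [show (0 : Int) = ((0 : Nat) : Int) by rfl, PySem.List.pyGetD_natCast]
      simp only [List.getD, List.getElem?_replicate]
      split <;> rfl
    · have hk1 : 1 ≤ ((k : Nat) : Int) := by omega
      rw [PySem.List.pyRange_one_succ_right hk1, List.foldl_append]
      simp only [List.foldl_cons, List.foldl_nil]
      have hlen : ((PySem.List.pyRange 1 ((k : Nat) : Int) 1).foldl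
          (fun pre j =>
            PySem.List.pySetD pre j
              (PySem.List.pyGetD bit_a j 0 + PySem.List.pyGetD pre (j - PySem.Int.band j (-j)) 0))
          (List.replicate bit_a.length 0)).length = bit_a.length := by
        rw [foldl_set_length]; exact List.length_replicate
      have hklen : k < bit_a.length := by omega
      have hjnat : j = ((j.toNat : Nat) : Int) := by omega
      rw [hjnat, PySem.List.pyGetD_pySetD_natCast _ k j.toNat _ _ (by omega)]
      by_cases hjk : j.toNat = k
      · rw [if_pos hjk]
        have hkpos : 0 < ((k : Nat) : Int) := by omega
        have hb := pvLowbitBounds ((k : Nat) : Int) hkpos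
        have hrec := ih (by omega) (((k : Nat) : Int) - PySem.Int.band ((k : Nat) : Int) (-((k : Nat) : Int)))
          (by omega) (by omega)
        rw [hrec, hjk, bitQueryGo_pos bit_a ((k : Nat) : Int) hkpos]
      · rw [if_neg hjk]
        have := ih (by omega) (((j.toNat : Nat)) : Int) (by omega) (by omega)
        rw [this, ← hjnat]

theorem preTable_correct (bit_a : List Int) (j : Int) (h0 : 0 ≤ j)
    (hj : j < (bit_a.length : Int)) :
    PySem.List.pyGetD (preTable bit_a) j 0 = bitQueryGo bit_a j 0 := by
  unfold preTable
  exact preTable_inv bit_a bit_a.length le_rfl j h0 hj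

-- B's table lookup equals A's chain walk on every index Pre_ admits
theorem query_eq (bit_a : List Int) (i : Int)
    (hi : i < 0 ∨ i + 1 < (bit_a.length : Int)) :
    qAlt (preTable bit_a) i = bitQuery bit_a i := by
  unfold qAlt bitQuery
  by_cases hpos : 0 < i + 1
  · have hi2 : i + 1 < (bit_a.length : Int) := by rcases hi with h | h; omega; exact h
    rw [if_pos hpos, preTable_correct bit_a (i + 1) (by omega) hi2]
  · rw [if_neg hpos, bitQueryGo, dif_neg (by omega)]

-- the two searches coincide as long as the upper end stays queryable
theorem loop_eq (bit_a : List Int) (cv l h_ : Int)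
    (hh : h_ < 0 ∨ h_ + 1 < (bit_a.length : Int)) :
    rbLoop l h_ cv bit_a = rbDescend l h_ cv (preTable bit_a) := by
  induction hn : (h_ - l).toNat using Nat.strong_induction_on generalizing l h_ with
  | _ n ih =>
    rw [rbLoop, rbDescend]
    by_cases hlt : l < h_
    · simp only [dif_pos hlt]
      have hm := PySem.Int.floordiv_two_mid_bounds (le_of_lt hlt) (lo := l) (hi := h_)
      have hm2 := pvMidLt l h_ hlt
      have hqm : qAlt (preTable bit_a) (PySem.Int.floordiv (l + h_) 2) =
          bitQuery bit_a (PySem.Int.floordiv (l + h_) 2) := by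
        apply query_eq
        rcases hh with h | h
        · left; omega
        · right; omega
      rw [hqm]
      by_cases hc : bitQuery bit_a (PySem.Int.floordiv (l + h_) 2) ≠ cv
      · rw [if_pos hc, if_pos hc]
        exact ih (PySem.Int.floordiv (l + h_) 2 - l).toNat (by omega) l _
          (by rcases hh with h | h
              · exact Or.inl (by omega)
              · exact Or.inr (by omega)) rfl
      · rw [if_neg hc, if_neg hc]
        exact ih (h_ - (PySem.Int.floordiv (l + h_) 2 + 1)).toNat (by omega) _ h_ hh rfl
    · simp [hlt]

-- ===== VERDICT (by name: the statement is the Claim_ definition above) =====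
theorem right_bs_spec : Claim_equal_right_bs := by
  intro l h_ cv bit_a _ hpre
  unfold Spec_right_bs right_bs right_bs_alt
  show _ = (if l > h_ ∨ cv = qAlt (preTable bit_a) h_ then -1
            else rbDescend l h_ cv (preTable bit_a))
  by_cases hl : l > h_
  · simp [hl]
  · have hh : h_ < 0 ∨ h_ + 1 < (bit_a.length : Int) := by
      rcases hpre with h | h | h
      · omega
      · exact Or.inl h
      · exact Or.inr h
    rw [query_eq bit_a h_ hh, loop_eq bit_a cv l h_ hh]
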